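-- pv_equiv track=rewrite | github.com/MathewMarchiano/Anomaly-Detection | HadamardMatrixGeneration.py | checkWeightsForAllExtrema
-- ===== SOURCE A (Python) =====
-- def transpose(matrix):
--     transposed = []
--     for i in range(len(matrix[0])):
--         transposed.append([])
--         for vector in matrix:
--             transposed[i].append(vector[i])
--     return transposed
--
-- def checkWeightsForAllExtrema(codes):
--     columns = transpose(codes)
--     rowLength = len(codes[0])
--     colLength = len(columns[0])
--     for code in codes:
--         weight = 0
--         for bit in code:
--             weight+=bit
--         if(weight== rowLength or weight == 0):
--             return 0
--     for code in columns:
--         weight = 0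
--         for bit in code:
--             weight+=bit
--         if (weight == colLength or weight ==0):
--             return 0
--     return 1
-- ===== SOURCE B (Python) =====
-- def checkWeightsForAllExtrema(codes):
--     rowLength = len(codes[0])
--     colLength = len(codes)
--     colSums = [0] * rowLength
--     for code in codes:
--         if sum(code) in (rowLength, 0):
--             return 0
--         for j in range(rowLength):
--             colSums[j] += code[j]
--     for s in colSums:
--         if s == colLength or s == 0:
--             return 0
--     return 1
-- ===== Notes on version B (the rewrite author's own statement) =====
-- stated objective: simpler
-- what changed: B drops the transpose helper entirely: one pass over the rows checks each row weight and accumulates running column sums in place, then a single scan of those sums replaces A's second loop over the materialized transposed matrix.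
import Mathlib
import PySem

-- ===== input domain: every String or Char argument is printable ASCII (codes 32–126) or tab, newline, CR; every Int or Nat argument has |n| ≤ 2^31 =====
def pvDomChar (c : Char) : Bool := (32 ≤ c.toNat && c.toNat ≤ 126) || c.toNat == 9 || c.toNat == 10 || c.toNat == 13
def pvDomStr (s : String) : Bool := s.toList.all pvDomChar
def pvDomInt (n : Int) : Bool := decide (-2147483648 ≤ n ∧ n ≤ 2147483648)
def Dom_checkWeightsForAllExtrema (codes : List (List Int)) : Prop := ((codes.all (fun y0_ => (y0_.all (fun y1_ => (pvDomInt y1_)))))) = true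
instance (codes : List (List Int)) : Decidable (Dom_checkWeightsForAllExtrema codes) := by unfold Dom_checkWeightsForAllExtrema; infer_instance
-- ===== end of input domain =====

-- B drops A's materialized transpose: one pass over the rows checks row weights and accumulates
-- running column sums, then a single scan of those sums replaces A's loop over transposed columns
-- (objective: simpler — less code, O(m) instead of O(n*m) extra space).

-- ===== PORT A =====
-- inner loop of transpose: 'for vector in matrix: transposed[i].append(vector[i])'
def transposeInnerA (matrix : List (List Int)) (i : Int) : Option (List Int) :=
  matrix.foldlM (fun col vector => do
    let x ← PySem.List.pyGet? vector i
    pure (col ++ [x])) []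

-- 'transposed = []; for i in range(len(matrix[0])): transposed.append([]); <inner loop>'
def transposeA (matrix : List (List Int)) : Option (List (List Int)) := do
  let m0 ← PySem.List.pyGet? matrix 0
  (PySem.List.pyRange 0 (m0.length : Int) 1).foldlM (fun transposed i => do
    let col ← transposeInnerA matrix i
    pure (transposed ++ [col])) []

-- first loop of A: returns some 0 at the first row whose weight is rowLength or 0
def rowLoopA (rows : List (List Int)) (rowLength : Int) : Option Int :=
  match rows with
  | [] => none
  | code :: rest =>
      let weight := code.foldl (· + ·) 0
      if weight = rowLength ∨ weight = 0 then some 0 else rowLoopA rest rowLength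

-- second loop of A: same shape over the transposed columns
def colLoopA (columns : List (List Int)) (colLength : Int) : Option Int :=
  match columns with
  | [] => none
  | code :: rest =>
      let weight := code.foldl (· + ·) 0
      if weight = colLength ∨ weight = 0 then some 0 else colLoopA rest colLength

def checkWeightsForAllExtrema (codes : List (List Int)) : Int :=
  match transposeA codes with
  | none => 0            -- Python raises here (excluded by Pre_)
  | some columns =>
    match PySem.List.pyGet? codes 0, PySem.List.pyGet? columns 0 with
    | some r0, some c0 =>
      match rowLoopA codes (r0.length : Int) with
      | some v => v
      | none =>
        match colLoopA columns (c0.length : Int) with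
        | some v => v
        | none => 1
    | _, _ => 0          -- Python raises here (excluded by Pre_)

-- ===== PORT B =====
-- inner loop of B: 'for j in range(rowLength): colSums[j] += code[j]'
-- (pyGetD/pySetD are exact here: Pre_ guarantees 0 ≤ j < rowLength ≤ len(code) = len(colSums) bound)
def bAddRow (colSums code : List Int) : List Int :=
  (PySem.List.pyRange 0 (colSums.length : Int) 1).foldl
    (fun cs j => PySem.List.pySetD cs j (PySem.List.pyGetD cs j 0 + PySem.List.pyGetD code j 0))
    colSums

-- main loop of B: none = early 'return 0' at an extreme row, otherwise the accumulated column sums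
def bRowLoop (rows : List (List Int)) (rowLength : Int) (colSums : List Int) : Option (List Int) :=
  match rows with
  | [] => some colSums
  | code :: rest =>
      if code.foldl (· + ·) 0 = rowLength ∨ code.foldl (· + ·) 0 = 0 then none
      else bRowLoop rest rowLength (bAddRow colSums code)

-- final scan of B: 'for s in colSums: if s == colLength or s == 0: return 0' then 'return 1'
def bColScan (sums : List Int) (colLength : Int) : Int :=
  match sums with
  | [] => 1
  | s :: rest => if s = colLength ∨ s = 0 then 0 else bColScan rest colLength

def checkWeightsForAllExtrema_alt (codes : List (List Int)) : Int :=
  let rowLength := (codes.headD []).length   -- codes[0]; Pre_ guarantees codes ≠ []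
  let colLength : Int := codes.length
  match bRowLoop codes (rowLength : Int) (List.replicate rowLength 0) with
  | none => 0
  | some colSums => bColScan colSums colLength

-- ===== PRECONDITION & SPEC =====
-- Pre_ excludes exactly the inputs where A raises: empty codes or an empty first row
-- (IndexError on codes[0]/columns[0]) and rows shorter than the first row (IndexError in transpose).
def Pre_checkWeightsForAllExtrema (codes : List (List Int)) : Prop :=
  codes ≠ [] ∧ codes.headD [] ≠ [] ∧ ∀ row ∈ codes, (codes.headD []).length ≤ row.length
instance (codes : List (List Int)) : Decidable (Pre_checkWeightsForAllExtrema codes) := by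
  unfold Pre_checkWeightsForAllExtrema; infer_instance

def pvWitness_checkWeightsForAllExtrema : List (List Int) := [[1, 0], [0, 1]]

def Spec_checkWeightsForAllExtrema (codes : List (List Int)) (out : Int) : Prop := out = checkWeightsForAllExtrema_alt codes
instance (codes : List (List Int)) (out : Int) : Decidable (Spec_checkWeightsForAllExtrema codes out) := by unfold Spec_checkWeightsForAllExtrema; infer_instance

-- ===== CLAIM (what is proved, stated in full; the proofs are below) =====
def Claim_equal_checkWeightsForAllExtrema : Prop := ∀ (codes : List (List Int)), Dom_checkWeightsForAllExtrema codes → Pre_checkWeightsForAllExtrema codes → Spec_checkWeightsForAllExtrema codes (checkWeightsForAllExtrema codes)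

-- ===== LEMMAS AND PROOFS =====

-- generic: a foldlM that appends one successfully-computed element per step is a map
theorem pv_foldlM_append {α β : Type} (l : List α) (f : α → Option β) (g : α → β)
    (acc : List β) (h : ∀ a ∈ l, f a = some (g a)) :
    l.foldlM (fun acc a => do
      let x ← f a
      pure (acc ++ [x])) acc = some (acc ++ l.map g) := by
  induction l generalizing acc with
  | nil => simp
  | cons a l ih =>
      rw [List.foldlM_cons, h a (by simp)]
      show List.foldlM _ (acc ++ [g a]) l = _
      rw [ih _ (fun b hb => h b (by simp [hb]))]
      simp

theorem pv_transposeInnerA_eq (matrix : List (List Int)) (j : Nat)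
    (h : ∀ v ∈ matrix, j < v.length) :
    transposeInnerA matrix (j : Int) = some (matrix.map (fun v => v.getD j 0)) := by
  unfold transposeInnerA
  have := pv_foldlM_append matrix (fun v => PySem.List.pyGet? v (j : Int))
    (fun v => v.getD j 0) [] (by
      intro v hv
      have hj := h v hv
      simp [PySem.List.pyGet?_natCast, List.getElem?_eq_getElem hj,
        List.getD_eq_getElem?_getD])
  simpa using this

theorem pv_rowLoopA_eq (rows : List (List Int)) (n : Int) :
    rowLoopA rows n =
      if ∃ c ∈ rows, c.foldl (· + ·) 0 = n ∨ c.foldl (· + ·) 0 = 0 then some 0 else none := by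
  induction rows with
  | nil => simp [rowLoopA]
  | cons c rest ih =>
      by_cases hc : c.foldl (· + ·) 0 = n ∨ c.foldl (· + ·) 0 = 0
      · simp [rowLoopA, hc]
      · simp [rowLoopA, hc, ih]

theorem pv_colLoopA_eq (cols : List (List Int)) (n : Int) :
    colLoopA cols n =
      if ∃ c ∈ cols, c.foldl (· + ·) 0 = n ∨ c.foldl (· + ·) 0 = 0 then some 0 else none := by
  induction cols with
  | nil => simp [colLoopA]
  | cons c rest ih =>
      by_cases hc : c.foldl (· + ·) 0 = n ∨ c.foldl (· + ·) 0 = 0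
      · simp [colLoopA, hc]
      · simp [colLoopA, hc, ih]

theorem pv_bColScan_eq (sums : List Int) (n : Int) :
    bColScan sums n = if ∃ s ∈ sums, s = n ∨ s = 0 then 0 else 1 := by
  induction sums with
  | nil => simp [bColScan]
  | cons s rest ih =>
      by_cases hs : s = n ∨ s = 0
      · simp [bColScan, hs]
      · simp [bColScan, hs, ih]

-- fold over range k, partially updated prefix
theorem pv_bAddRow_partial (cs code : List Int) (k : Nat) (hk : k ≤ cs.length) :
    (List.range k).foldl
      (fun cs' j => cs'.set j (cs'.getD j 0 + code.getD j 0)) cs =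
    (List.range k).map (fun j => cs.getD j 0 + code.getD j 0) ++ cs.drop k := by
  induction k with
  | zero => simp
  | succ k ih =>
      have hk' : k ≤ cs.length := Nat.le_of_succ_le hk
      have hklt : k < cs.length := hk
      rw [List.range_succ, List.foldl_append, List.map_append, ih hk']
      simp only [List.foldl_cons, List.foldl_nil, List.map_cons, List.map_nil]
      have hlen : ((List.range k).map (fun j => cs.getD j 0 + code.getD j 0)).length = k := by
        simp
      have hdrop : cs.drop k = cs[k] :: cs.drop (k + 1) := List.drop_eq_getElem_cons hklt
      rw [hdrop]
      have hget : (((List.range k).map (fun j => cs.getD j 0 + code.getD j 0)) ++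
          cs[k] :: cs.drop (k + 1)).getD k 0 = cs[k] := by
        rw [List.getD_eq_getElem?_getD, List.getElem?_append_right (by omega), hlen]
        simp [List.getElem?_eq_getElem hklt]
      rw [hget, List.set_append]
      simp only [hlen, Nat.lt_irrefl, Nat.sub_self, List.set_cons_zero]
      rw [List.append_assoc]
      simp [List.getD_eq_getElem?_getD, List.getElem?_eq_getElem hklt]

theorem pv_bAddRow_eq (cs code : List Int) :
    bAddRow cs code = (List.range cs.length).map (fun j => cs.getD j 0 + code.getD j 0) := by
  unfold bAddRow
  rw [PySem.List.pyRange_one]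
  simp only [Int.sub_zero, Int.toNat_natCast, List.foldl_map, Int.zero_add,
    PySem.List.pySetD_natCast, PySem.List.pyGetD_natCast, Int.toNat_natCast]
  have := pv_bAddRow_partial cs code cs.length (le_refl _)
  simpa using this

theorem pv_bRowLoop_eq (rows : List (List Int)) (n : Int) (cs : List Int) :
    bRowLoop rows n cs =
      if ∃ c ∈ rows, c.foldl (· + ·) 0 = n ∨ c.foldl (· + ·) 0 = 0 then none
      else some (rows.foldl bAddRow cs) := by
  induction rows generalizing cs with
  | nil => simp [bRowLoop]
  | cons c rest ih =>
      by_cases hc : c.foldl (· + ·) 0 = n ∨ c.foldl (· + ·) 0 = 0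
      · simp [bRowLoop, hc]
      · simp [bRowLoop, hc, ih]

theorem pv_foldl_shift (l : List (List Int)) (j : Nat) (s : Int) :
    l.foldl (fun a r => a + r.getD j 0) s = s + l.foldl (fun a r => a + r.getD j 0) 0 := by
  induction l generalizing s with
  | nil => simp
  | cons r rest ih =>
      rw [List.foldl_cons, List.foldl_cons, ih (s + r.getD j 0), ih (0 + r.getD j 0)]
      ring

-- the accumulated column sums, pointwise
theorem pv_foldl_bAddRow (rows : List (List Int)) (cs : List Int)
    (h : ∀ r ∈ rows, cs.length ≤ r.length) :
    rows.foldl bAddRow cs =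
      (List.range cs.length).map
        (fun j => cs.getD j 0 + rows.foldl (fun a r => a + r.getD j 0) 0) := by
  induction rows generalizing cs with
  | nil =>
      simp only [List.foldl_nil, Int.add_zero]
      apply List.ext_getElem (by simp)
      intro j hj _
      simp only [List.getElem_map, List.getElem_range]
      rw [List.getD_eq_getElem?_getD, List.getElem?_eq_getElem (by simpa using hj)]
      rfl
  | cons r rest ih =>
      have hr : cs.length ≤ r.length := h r (by simp)
      have hlen : (bAddRow cs r).length = cs.length := by rw [pv_bAddRow_eq]; simp
      rw [List.foldl_cons, ih (bAddRow cs r) (by intro x hx; rw [hlen]; exact h x (by simp [hx]))]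
      rw [hlen]
      apply List.map_congr_left
      intro j hj
      rw [List.mem_range] at hj
      have hget : (bAddRow cs r).getD j 0 = cs.getD j 0 + r.getD j 0 := by
        rw [pv_bAddRow_eq, List.getD_eq_getElem?_getD, List.getElem?_map,
          List.getElem?_range hj]
        rfl
      rw [hget, List.foldl_cons, pv_foldl_shift rest j (0 + r.getD j 0)]
      ring

-- ===== VERDICT (by name: the statement is the Claim_ definition above) =====
-- column sums agree: A's sum of a transposed column = B's accumulated colSums entry
theorem pv_sum_map_foldl (codes : List (List Int)) (j : Nat) :
    (codes.map (fun v => v.getD j 0)).foldl (· + ·) 0 =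
      codes.foldl (fun a r => a + r.getD j 0) 0 := by
  rw [List.foldl_map]

theorem checkWeightsForAllExtrema_spec : Claim_equal_checkWeightsForAllExtrema := by
  intro codes _ hPre
  obtain ⟨hne, hhd, hrows⟩ := hPre
  obtain ⟨r0, rest, rfl⟩ : ∃ r0 rest, codes = r0 :: rest := by
    cases codes with
    | nil => exact absurd rfl hne
    | cons a l => exact ⟨a, l, rfl⟩
  simp only [List.headD_cons] at hhd hrows
  have hLpos : 0 < r0.length := List.length_pos_iff.mpr hhd
  set colFn : Nat → List Int := fun j => (r0 :: rest).map (fun v => v.getD j 0) with hcolFn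
  have htrans : transposeA (r0 :: rest) = some ((List.range r0.length).map colFn) := by
    unfold transposeA
    rw [show PySem.List.pyGet? (r0 :: rest) 0 = some r0 from PySem.List.pyGet?_zero_cons r0 rest]
    have hfold := pv_foldlM_append (PySem.List.pyRange 0 (r0.length : Int) 1)
      (fun i => transposeInnerA (r0 :: rest) i) (fun i => colFn i.toNat) []
      (by
        intro i hi
        rw [PySem.List.mem_pyRange_one] at hi
        have h0 : i = ((i.toNat : Nat) : Int) := (Int.toNat_of_nonneg hi.1).symm
        have hiL : i.toNat < r0.length := by omega
        show transposeInnerA (r0 :: rest) i = some (colFn i.toNat)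
        rw [h0, pv_transposeInnerA_eq (r0 :: rest) i.toNat
          (fun v hv => Nat.lt_of_lt_of_le hiL (hrows v hv))]
        simp [hcolFn, max_eq_left hi.1])
    exact hfold.trans (by
      rw [PySem.List.pyRange_one]
      simp [List.map_map, Function.comp_def])
  have hcols0 : PySem.List.pyGet? ((List.range r0.length).map colFn) 0 = some (colFn 0) := by
    rw [PySem.List.pyGet?_zero, List.getElem?_map, List.getElem?_range hLpos]
    rfl
  have hcolFn0len : (colFn 0).length = (r0 :: rest).length := by simp [hcolFn]
  have hsums : (r0 :: rest).foldl bAddRow (List.replicate r0.length 0) =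
      (List.range r0.length).map (fun j => (r0 :: rest).foldl (fun a r => a + r.getD j 0) 0) := by
    rw [pv_foldl_bAddRow (r0 :: rest) (List.replicate r0.length 0)
      (by intro r hr; rw [List.length_replicate]; exact hrows r hr)]
    simp
  have hiff : (∃ c ∈ (List.range r0.length).map colFn,
        c.foldl (· + ·) 0 = ((r0 :: rest).length : Int) ∨ c.foldl (· + ·) 0 = 0) ↔
      (∃ s ∈ (List.range r0.length).map (fun j => (r0 :: rest).foldl (fun a r => a + r.getD j 0) 0),
        s = ((r0 :: rest).length : Int) ∨ s = 0) := by
    simp only [List.mem_map, List.mem_range]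
    constructor
    · rintro ⟨c, ⟨j, hj, rfl⟩, hc⟩
      exact ⟨_, ⟨j, hj, rfl⟩, by rwa [← pv_sum_map_foldl]⟩
    · rintro ⟨s, ⟨j, hj, rfl⟩, hs⟩
      exact ⟨colFn j, ⟨j, hj, rfl⟩, by rwa [hcolFn, pv_sum_map_foldl]⟩
  unfold Spec_checkWeightsForAllExtrema checkWeightsForAllExtrema checkWeightsForAllExtrema_alt
  rw [htrans]
  simp only [PySem.List.pyGet?_zero_cons, hcols0, List.headD_cons]
  rw [pv_rowLoopA_eq, pv_bRowLoop_eq]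
  by_cases hE : ∃ c ∈ r0 :: rest, c.foldl (· + ·) 0 = (r0.length : Int) ∨ c.foldl (· + ·) 0 = 0
  · rw [if_pos hE, if_pos hE]
  · rw [if_neg hE, if_neg hE]
    rw [pv_colLoopA_eq]
    show (match (if (∃ c ∈ (List.range r0.length).map colFn,
          c.foldl (· + ·) 0 = ((colFn 0).length : Int) ∨ c.foldl (· + ·) 0 = 0)
          then (some 0 : Option Int) else none) with
        | some v => v
        | none => 1) =
      bColScan ((r0 :: rest).foldl bAddRow (List.replicate r0.length 0)) ((r0 :: rest).length : Int)
    rw [pv_bColScan_eq, hsums, hcolFn0len]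
    by_cases hc : ∃ c ∈ (List.range r0.length).map colFn,
        c.foldl (· + ·) 0 = ((r0 :: rest).length : Int) ∨ c.foldl (· + ·) 0 = 0
    · rw [if_pos hc, if_pos (hiff.mp hc)]
    · rw [if_neg hc, if_neg (fun h => hc (hiff.mpr h))]
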